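-- pv_equiv track=rewrite | github.com/ferrixio/discord-DiceWorks | diceBlock.py | string2dice
-- ===== SOURCE A (Python) =====
-- def string2dice(L:list):
--     """The first 'main' function of the bot. It prepares a dice-rolls-string from input. Logic behind:
--         - Removes only the first +/- and the last +/-, if there were any
--         - For each element of the input:
--             - if begins with +/-, attaches it to previous item (if first, don't)
--             - if ends with +/-, join it with the next item
--             - else appends it (isolated item)
--         - Returns a list of strings (in lowercase)
--
--     Example:\n
--     INPUT from !command: ('3d20+1', '+2', '+1d4', '1-', '6d8-1', '-1d10', '-3')\n
--     OUTPUT: ['3d20+1+2+1d4', '1-6d8-1-1d10-3']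
--     """
--
--     C=[L[0].lower()]
--     for i in range(1,len(L)):
--         if L[i][0] in ('+','-'):    # starts with +/-
--             C[-1] += L[i].lower()
--         elif L[i][-1] in ('+','-'):     # ends with +/-
--             L[i + 1] = L[i] + L[i + 1]
--         else:
--             if C[-1][-1] in ('+', '-'):
--                 C[-1] += L[i].lower()
--             else:
--                 C.append(L[i].lower())
--     C = [i for i in C if 'd' in i]  #removes unused constants
--
--     # if there are no dice, raise an error
--     if C == []:
--         raise TypeError('No dice? :face_with_monocle:')
--
--     return C
-- ===== SOURCE B (Python) =====
-- def string2dice(L):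
--     # pass 1: carry any token that ends with '+'/'-' (and does not start with one)
--     # forward onto the next token; emit everything else lowercased
--     cleaned = []
--     carry = ''
--     for x in L:
--         t = carry + x
--         if t[0] not in '+-' and t[-1] in '+-':
--             carry = t
--         else:
--             cleaned.append(t.lower())
--             carry = ''
--     if carry:
--         cleaned.append(carry.lower())
--     # pass 2: fold the cleaned tokens into groups joined across '+'/'-'
--     groups = [cleaned[0]]
--     for t in cleaned[1:]:
--         if t[0] in '+-' or groups[-1][-1] in '+-':
--             groups[-1] += t
--         else:
--             groups.append(t)
--     groups = [g for g in groups if 'd' in g]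
--     if not groups:
--         raise TypeError('No dice? :face_with_monocle:')
--     return groups
-- ===== Notes on version B (the rewrite author's own statement) =====
-- stated objective: simpler
-- what changed: Replaces A's single loop that mutates L in place (writing merged tokens back into L[i+1]) with two non-mutating passes: a carry pass that folds sign-ending tokens onto their successor, then a fold of the cleaned tokens into sign-joined groups.
-- outside the precondition, e.g. on string2dice(['', '+d6']): A returns ['+d6'], B raises IndexError
import Mathlib
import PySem

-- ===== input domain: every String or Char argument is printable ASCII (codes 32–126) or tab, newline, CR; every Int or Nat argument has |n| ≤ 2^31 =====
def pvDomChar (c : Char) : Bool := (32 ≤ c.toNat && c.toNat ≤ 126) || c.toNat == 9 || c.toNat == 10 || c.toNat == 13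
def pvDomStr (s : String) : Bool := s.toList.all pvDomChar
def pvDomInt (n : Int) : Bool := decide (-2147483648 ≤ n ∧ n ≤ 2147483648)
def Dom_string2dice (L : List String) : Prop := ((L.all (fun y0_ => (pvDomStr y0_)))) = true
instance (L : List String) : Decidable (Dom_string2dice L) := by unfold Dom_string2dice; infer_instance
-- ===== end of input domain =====

-- B rewrites A's single mutating loop as two passes (carry tokens ending in +/- forward, then
-- fold into sign-joined groups); objective: simpler. Equivalence is about the RETURN value only:
-- A mutates its argument list in place (L[i+1] = L[i] + L[i+1]), B does not.

-- "c is '+' or '-'" membership test (Python: c in ('+','-')); none = no character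
def pvSC (oc : Option Char) : Bool := oc == some '+' || oc == some '-'
-- first / last character tests (on nonempty strings these match Python's s[0] / s[-1] tests)
def pvStartS (s : String) : Bool := pvSC (PySem.Str.pyGet? s 0)
def pvEndS (s : String) : Bool := pvSC (PySem.Str.pyGet? s (-1))

-- ===== PORT A =====
-- A's for-loop over i = 1 .. len(L)-1.  The loop only reads L[i] and writes L[i+1], so the
-- mutated tail of L is carried as the first argument (head = current L[i]); C is kept reversed
-- (head = C[-1], Python appends/extends the last element).  none = IndexError.
def string2diceGoA : List String → List String → Option (List String)
  | [], C => some C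
  | s :: rest, C =>
    match PySem.Str.pyGet? s 0 with
    | none => none                                   -- L[i][0]: IndexError on empty token
    | some c0 =>
      if pvSC (some c0) then                         -- L[i][0] in ('+','-')
        match C with
        | [] => none                                 -- unreachable: C is never empty
        | h :: t => string2diceGoA rest ((h ++ PySem.Str.lower s) :: t)
      else
        match PySem.Str.pyGet? s (-1) with
        | none => none
        | some cl =>
          if pvSC (some cl) then                     -- L[i][-1] in ('+','-')
            match rest with
            | [] => none                             -- L[i+1]: IndexError past the end
            | t :: r => string2diceGoA ((s ++ t) :: r) C   -- L[i+1] = L[i] + L[i+1]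
          else
            match C with
            | [] => none
            | h :: tl =>
              match PySem.Str.pyGet? h (-1) with
              | none => none                         -- C[-1][-1]: IndexError on empty last group
              | some hl =>
                if pvSC (some hl) then string2diceGoA rest ((h ++ PySem.Str.lower s) :: tl)
                else string2diceGoA rest (PySem.Str.lower s :: h :: tl)
  termination_by rest _ => rest.length
  decreasing_by all_goals simp

def string2dice (L : List String) : List String :=
  match L with
  | [] => []                                         -- Python: IndexError on L[0] (outside Pre_)
  | x :: rest =>
    match string2diceGoA rest [PySem.Str.lower x] with      -- C = [L[0].lower()]
    | none => []                                     -- IndexError inside the loop (outside Pre_)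
    | some Crev =>
      let C := Crev.reverse.filter (fun g => PySem.Str.isIn "d" g)   -- [i for i in C if 'd' in i]
      if C = [] then [] else C                       -- [] = the TypeError raise (outside Pre_)

-- ===== PORT B =====
-- pass 1 of Source B: carry a token that ends with '+'/'-' (and does not start with one) onto the
-- next token, emit everything else lowercased; flush a leftover carry.  none = IndexError.
def string2diceClean : String → List String → Option (List String)
  | carry, [] => some (if carry = "" then [] else [PySem.Str.lower carry])
  | carry, x :: xs =>
    let t := carry ++ x
    match PySem.Str.pyGet? t 0 with
    | none => none                                   -- t[0]: IndexError on empty t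
    | some c0 =>
      if !pvSC (some c0) && pvEndS t then string2diceClean t xs
      else (string2diceClean "" xs).map (PySem.Str.lower t :: ·)

-- pass 2 of Source B: fold cleaned tokens into groups; acc is reversed (head = groups[-1]).
-- string2diceClean only emits nonempty tokens, so pvStartS/pvEndS are exact for Source B's t[0]/g[-1].
def string2diceGroup : List String → List String → List String
  | [], acc => acc
  | t :: ts, acc =>
    match acc with
    | [] => string2diceGroup ts [t]                  -- seeding groups = [cleaned[0]]
    | g :: gs =>
      if pvStartS t || pvEndS g then string2diceGroup ts ((g ++ t) :: gs)
      else string2diceGroup ts (t :: g :: gs)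

def string2dice_alt (L : List String) : List String :=
  match string2diceClean "" L with
  | none => []                                       -- IndexError (outside Pre_)
  | some cleaned =>
    match cleaned with
    | [] => []                                       -- cleaned[0]: IndexError (outside Pre_)
    | c :: cs =>
      let G := (string2diceGroup cs [c]).reverse.filter (fun g => PySem.Str.isIn "d" g)
      if G = [] then [] else G                       -- [] = the TypeError raise (outside Pre_)

-- ===== PRECONDITION & SPEC =====
-- true iff some suffix of the list starts with a token that does not begin with '+'/'-' and all
-- of whose tokens (to the end of the list) end with '+'/'-' — exactly when A's forward merge
-- cascades past the last element and raises IndexError on L[i + 1].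
def pvBadTail : List String → Bool
  | [] => false
  | s :: r => (!pvStartS s && pvEndS s && r.all pvEndS) || pvBadTail r

-- Pre_ excludes the inputs on which Python A raises: the empty list and a merge cascade reaching
-- the end (IndexError), no token containing a 'd'/'D' (the TypeError raise), and lists containing
-- an empty-string token — on those A raises IndexError except in accidental corners such as
-- ['', '+d6'] where A returns but B's natural pass raises (see claim cites).
def Pre_string2dice (L : List String) : Prop :=
  L ≠ [] ∧ (∀ s ∈ L, s ≠ "") ∧
  (∃ s ∈ L, PySem.Str.isIn "d" (PySem.Str.lower s) = true) ∧
  pvBadTail L.tail = false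
instance (L : List String) : Decidable (Pre_string2dice L) := by
  unfold Pre_string2dice; infer_instance

def pvWitness_string2dice : List String := ["3d20+1", "+2", "+1D4", "1-", "6d8-1", "-1d10", "-3"]

def Spec_string2dice (L : List String) (out : List String) : Prop := out = string2dice_alt L
instance (L : List String) (out : List String) : Decidable (Spec_string2dice L out) := by
  unfold Spec_string2dice; infer_instance

-- ===== CLAIM (what is proved, stated in full; the proofs are below) =====
def Claim_equal_string2dice : Prop :=
  ∀ (L : List String), Dom_string2dice L → Pre_string2dice L → Spec_string2dice L (string2dice L)

-- ===== LEMMAS AND PROOFS =====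

theorem pvToList_ne {s : String} (h : s ≠ "") : s.toList ≠ [] := by
  simpa [String.toList_eq_nil_iff] using h

theorem pvFirst?_eq (s : String) : PySem.Str.pyGet? s 0 = s.toList[0]? := by
  simpa using PySem.Str.pyGet?_natCast s 0

theorem pvLast?_eq (s : String) : PySem.Str.pyGet? s (-1) = s.toList.getLast? := by
  rw [PySem.Str.pyGet?_eq, PySem.Chars.pyGet?_eq_listPyGet?, PySem.List.pyGet?_neg_one]

theorem pvAppend_ne_left {s : String} (t : String) (h : s ≠ "") : s ++ t ≠ "" := by
  intro hc
  apply pvToList_ne h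
  have := congrArg String.toList hc
  simp [String.toList_append] at this
  simp [this.1]

theorem pvStartS_append {s : String} (t : String) (h : s ≠ "") :
    pvStartS (s ++ t) = pvStartS s := by
  obtain ⟨c, cs, hs⟩ := List.exists_cons_of_ne_nil (pvToList_ne h)
  simp [pvStartS, pvFirst?_eq, String.toList_append, hs]

theorem pvEndS_append (s : String) {t : String} (h : t ≠ "") :
    pvEndS (s ++ t) = pvEndS t := by
  have ht := pvToList_ne h
  simp only [pvEndS, pvLast?_eq, String.toList_append]
  rw [List.getLast?_append]
  cases hl : t.toList.getLast? with
  | none => exact absurd (List.getLast?_eq_none_iff.mp hl) ht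
  | some c => simp

theorem pvSC_lowerChar (c : Char) :
    pvSC (some (PySem.Chars.lowerChar c)) = pvSC (some c) := by
  unfold PySem.Chars.lowerChar
  split_ifs with h
  · simp [PySem.Chars.isupper, Char.le_def] at h
    have h1 : 65 ≤ c.toNat := h.1
    have h2 : c.toNat ≤ 90 := h.2
    have hv : Nat.isValidChar (c.toNat + 32) := Or.inl (by omega)
    have ht : (Char.ofNat (c.toNat + 32)).toNat = c.toNat + 32 := by
      rw [Char.toNat_ofNat, if_pos hv]
    have ha : (Char.ofNat (c.toNat + 32) == '+') = false := by
      apply beq_eq_false_iff_ne.mpr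
      intro he; have := congrArg Char.toNat he; simp [ht] at this; omega
    have hb : (Char.ofNat (c.toNat + 32) == '-') = false := by
      apply beq_eq_false_iff_ne.mpr
      intro he; have := congrArg Char.toNat he; simp [ht] at this; omega
    have hc1 : (c == '+') = false := by
      apply beq_eq_false_iff_ne.mpr
      intro he; subst he; simp at h1
    have hc2 : (c == '-') = false := by
      apply beq_eq_false_iff_ne.mpr
      intro he; subst he; simp at h1
    simp [pvSC, ha, hb, hc1, hc2]
  · rfl

theorem pvLower_toList (s : String) :
    (PySem.Str.lower s).toList = s.toList.map PySem.Chars.lowerChar := by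
  simp [PySem.Str.toList_lower, PySem.Chars.lower]

theorem pvLower_ne {s : String} (h : s ≠ "") : PySem.Str.lower s ≠ "" := by
  intro hc
  apply pvToList_ne h
  have := congrArg String.toList hc
  simp [pvLower_toList, PySem.Chars.lower] at this
  simp [this]

theorem pvStartS_lower (s : String) : pvStartS (PySem.Str.lower s) = pvStartS s := by
  simp only [pvStartS, pvFirst?_eq, pvLower_toList, List.getElem?_map]
  cases h : s.toList[0]? with
  | none => rfl
  | some c => simp [pvSC_lowerChar]

theorem pvLower_append (s t : String) :
    PySem.Str.lower (s ++ t) = PySem.Str.lower s ++ PySem.Str.lower t := by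
  apply String.toList_injective
  simp [pvLower_toList, PySem.Chars.lower, String.toList_append]

theorem pvEmpty_append (s : String) : ("" ++ s : String) = s := by simp

theorem pvAppend_assoc (s t u : String) : (s ++ t) ++ u = s ++ (t ++ u) := by
  apply String.toList_injective
  simp [String.toList_append]

-- merging a non-sign-starting, sign-ending token into its successor preserves ¬pvBadTail
theorem pvBadTail_merge {s t : String} (r : List String) (hs : s ≠ "") (ht : t ≠ "")
    (h0 : pvStartS s = false) (h1 : pvEndS s = true)
    (hb : pvBadTail (s :: t :: r) = false) : pvBadTail ((s ++ t) :: r) = false := by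
  simp [pvBadTail, h0, h1, pvStartS_append t hs, pvEndS_append s ht] at *
  tauto

-- clean only looks at carry ++ first token
theorem pvClean_carry (carry x : String) (xs : List String) :
    string2diceClean carry (x :: xs) = string2diceClean "" ((carry ++ x) :: xs) := by
  simp [string2diceClean, pvEmpty_append]

-- main simulation: A's loop from a state with last group g equals clean-then-group
theorem pvMain : ∀ (n : Nat) (rest : List String), rest.length ≤ n →
    (∀ s ∈ rest, s ≠ "") → pvBadTail rest = false →
    ∀ g gs, g ≠ "" →
    string2diceGoA rest (g :: gs) =
      (string2diceClean "" rest).map (fun cl => string2diceGroup cl (g :: gs)) := by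
  intro n
  induction n with
  | zero =>
    intro rest hlen _ _ g gs _
    have : rest = [] := List.length_eq_zero_iff.mp (Nat.le_zero.mp hlen)
    subst this
    simp [string2diceGoA, string2diceClean, string2diceGroup]
  | succ n ih =>
    intro rest hlen hne hb g gs hg
    cases rest with
    | nil => simp [string2diceGoA, string2diceClean, string2diceGroup]
    | cons s rest' =>
      have hs : s ≠ "" := hne s (by simp)
      obtain ⟨c, cs, hcs⟩ := List.exists_cons_of_ne_nil (pvToList_ne hs)
      have hfirst : PySem.Str.pyGet? s 0 = some c := by rw [pvFirst?_eq, hcs]; rfl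
      have hss : pvStartS s = pvSC (some c) := by rw [pvStartS, hfirst]
      have hbad' : pvBadTail rest' = false := by
        simp [pvBadTail] at hb; exact hb.2
      have hne' : ∀ u ∈ rest', u ≠ "" := fun u hu => hne u (List.mem_cons_of_mem _ hu)
      obtain ⟨e, he⟩ : ∃ e, s.toList.getLast? = some e := by
        exact Option.isSome_iff_exists.mp (List.getLast?_isSome.mpr (pvToList_ne hs))
      have hlaste : PySem.Str.pyGet? s (-1) = some e := by rw [pvLast?_eq, he]
      have hes : pvEndS s = pvSC (some e) := by rw [pvEndS, hlaste]
      have hfirstL : PySem.List.pyGet? s.toList 0 = some c := by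
        rw [PySem.List.pyGet?_zero, hcs]; rfl
      have hlastL : PySem.List.pyGet? s.toList (-1) = some e := by
        rw [PySem.List.pyGet?_neg_one, he]
      by_cases hsc : pvSC (some c) = true
      · -- token starts with '+'/'-': both sides glue it onto g
        have hA : string2diceGoA (s :: rest') (g :: gs) =
            string2diceGoA rest' ((g ++ PySem.Str.lower s) :: gs) := by
          rw [string2diceGoA.eq_def]
          simp [hfirstL, hsc]
        rw [hA, ih rest' (by simp only [List.length_cons] at hlen; omega) hne' hbad' _ gs
          (pvAppend_ne_left _ hg)]
        have hcl : string2diceClean "" (s :: rest') =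
            (string2diceClean "" rest').map (PySem.Str.lower s :: ·) := by
          rw [string2diceClean]
          simp [pvEmpty_append, hfirstL, hsc]
        rw [hcl]
        cases string2diceClean "" rest' with
        | none => rfl
        | some cl =>
          simp only [Option.map_some]
          congr 1
          rw [string2diceGroup]
          simp [pvStartS_lower, hss, hsc]
      · -- token does not start with a sign
        have hscf : pvSC (some c) = false := by simpa using hsc
        by_cases heb : pvSC (some e) = true
        · -- token ends with a sign: A merges it into the next token, B carries it
          have hest : pvEndS s = true := by rw [hes]; exact heb
          cases rest' with
          | nil =>
            exfalso
            simp [pvBadTail, hss, hscf, hest] at hb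
          | cons t r =>
            have ht : t ≠ "" := hne t (by simp)
            have hA : string2diceGoA (s :: t :: r) (g :: gs) =
                string2diceGoA ((s ++ t) :: r) (g :: gs) := by
              rw [string2diceGoA.eq_def]
              simp [hfirstL, hscf, hlastL, heb]
            have hB : string2diceClean "" (s :: t :: r) =
                string2diceClean "" ((s ++ t) :: r) := by
              have h1 : string2diceClean "" (s :: t :: r) = string2diceClean s (t :: r) := by
                rw [string2diceClean]
                simp [pvEmpty_append, hfirstL, hscf, hest]
              rw [h1, pvClean_carry]
            have hmerge : pvBadTail ((s ++ t) :: r) = false :=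
              pvBadTail_merge r hs ht (by rw [hss]; exact hscf) hest hb
            have hnem : ∀ u ∈ (s ++ t) :: r, u ≠ "" := by
              intro u hu
              rcases List.mem_cons.mp hu with h | h
              · subst h; exact pvAppend_ne_left _ hs
              · exact hne' u (List.mem_cons_of_mem _ h)
            rw [hA, hB]
            exact ih _ (by simp only [List.length_cons] at hlen ⊢; omega) hnem hmerge g gs hg
        · -- token has no sign at either end: branch on whether g ends with a sign
          have hebf : pvSC (some e) = false := by simpa using heb
          have hesf : pvEndS s = false := by rw [hes]; exact hebf
          obtain ⟨f, hf⟩ : ∃ f, g.toList.getLast? = some f :=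
            Option.isSome_iff_exists.mp (List.getLast?_isSome.mpr (pvToList_ne hg))
          have hlastg : PySem.List.pyGet? g.toList (-1) = some f := by
            rw [PySem.List.pyGet?_neg_one, hf]
          have hgends : pvEndS g = pvSC (some f) := by
            rw [pvEndS, pvLast?_eq, hf]
          have hcl : string2diceClean "" (s :: rest') =
              (string2diceClean "" rest').map (PySem.Str.lower s :: ·) := by
            rw [string2diceClean]
            simp [pvEmpty_append, hfirstL, hesf]
          by_cases hgb : pvSC (some f) = true
          · have hA : string2diceGoA (s :: rest') (g :: gs) =
                string2diceGoA rest' ((g ++ PySem.Str.lower s) :: gs) := by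
              rw [string2diceGoA.eq_def]
              simp [hfirstL, hscf, hlastL, hebf, hlastg, hgb]
            rw [hA, ih rest' (by simp only [List.length_cons] at hlen; omega) hne' hbad' _ gs
              (pvAppend_ne_left _ hg), hcl]
            cases string2diceClean "" rest' with
            | none => rfl
            | some cl =>
              simp only [Option.map_some]
              congr 1
              rw [string2diceGroup]
              simp [hgends, hgb]
          · have hgbf : pvSC (some f) = false := by simpa using hgb
            have hA : string2diceGoA (s :: rest') (g :: gs) =
                string2diceGoA rest' (PySem.Str.lower s :: g :: gs) := by
              rw [string2diceGoA.eq_def]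
              simp [hfirstL, hscf, hlastL, hebf, hlastg, hgbf]
            rw [hA, ih rest' (by simp only [List.length_cons] at hlen; omega) hne' hbad' _
              (g :: gs) (pvLower_ne hs), hcl]
            cases string2diceClean "" rest' with
            | none => rfl
            | some cl =>
              simp only [Option.map_some]
              congr 1
              rw [string2diceGroup]
              simp [pvStartS_lower, hss, hscf, hgends, hgbf]

-- carry-mode simulation for the first token (A seeds C with it, B carries it)
theorem pvCarry : ∀ (n : Nat) (rest : List String), rest.length ≤ n →
    (∀ s ∈ rest, s ≠ "") → pvBadTail rest = false →
    ∀ p, p ≠ "" → pvStartS p = false → pvEndS p = true →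
    string2diceGoA rest [PySem.Str.lower p] =
      (string2diceClean p rest).map (fun cl => string2diceGroup cl []) := by
  intro n
  induction n with
  | zero =>
    intro rest hlen _ _ p hp _ _
    have : rest = [] := List.length_eq_zero_iff.mp (Nat.le_zero.mp hlen)
    subst this
    simp [string2diceGoA, string2diceClean, string2diceGroup, hp]
  | succ n ih =>
    intro rest hlen hne hb p hp hps hpe
    cases rest with
    | nil => simp [string2diceGoA, string2diceClean, string2diceGroup, hp]
    | cons t r =>
      have ht : t ≠ "" := hne t (by simp)
      have hne' : ∀ u ∈ r, u ≠ "" := fun u hu => hne u (List.mem_cons_of_mem _ hu)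
      have hbad' : pvBadTail r = false := by
        simp [pvBadTail] at hb; exact hb.2
      obtain ⟨a, as, hpa⟩ := List.exists_cons_of_ne_nil (pvToList_ne hp)
      obtain ⟨c, cs, htc⟩ := List.exists_cons_of_ne_nil (pvToList_ne ht)
      obtain ⟨e, he⟩ : ∃ e, t.toList.getLast? = some e :=
        Option.isSome_iff_exists.mp (List.getLast?_isSome.mpr (pvToList_ne ht))
      have hfirstL : PySem.List.pyGet? t.toList 0 = some c := by
        rw [PySem.List.pyGet?_zero, htc]; rfl
      have hlastL : PySem.List.pyGet? t.toList (-1) = some e := by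
        rw [PySem.List.pyGet?_neg_one, he]
      have hts : pvStartS t = pvSC (some c) := by
        rw [pvStartS, pvFirst?_eq, htc]; rfl
      have hte : pvEndS t = pvSC (some e) := by
        rw [pvEndS, pvLast?_eq, he]
      have hpsa : pvSC (some a) = false := by
        rw [pvStartS, pvFirst?_eq, hpa] at hps; exact hps
      have hfirstPT : PySem.List.pyGet? (p.toList ++ t.toList) 0 = some a := by
        rw [PySem.List.pyGet?_zero, hpa]; rfl
      have hpt : p ++ t ≠ "" := pvAppend_ne_left _ hp
      have hept : pvEndS (p ++ t) = pvEndS t := pvEndS_append p ht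
      have hspt : pvStartS (p ++ t) = false := by rw [pvStartS_append t hp]; exact hps
      -- B's first step: the condition of clean on p ++ t
      have hBstep : string2diceClean p (t :: r) =
          (if pvEndS (p ++ t) = true then string2diceClean (p ++ t) r
           else (string2diceClean "" r).map (PySem.Str.lower (p ++ t) :: ·)) := by
        rw [string2diceClean]
        simp [String.toList_append, hfirstPT, hpsa]
      -- A's glue onto the seed produces lower (p ++ t)
      have hglue : PySem.Str.lower p ++ PySem.Str.lower t = PySem.Str.lower (p ++ t) :=
        (pvLower_append p t).symm
      by_cases heb : pvSC (some e) = true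
      · -- t ends with a sign
        by_cases hsc : pvSC (some c) = true
        · -- t also starts with a sign: A glues it, B extends the carry
          have hA : string2diceGoA (t :: r) [PySem.Str.lower p] =
              string2diceGoA r [PySem.Str.lower p ++ PySem.Str.lower t] := by
            rw [string2diceGoA.eq_def]
            simp [hfirstL, hsc]
          rw [hA, hglue, hBstep, if_pos (by rw [hept, hte]; exact heb)]
          exact ih r (by simp only [List.length_cons] at hlen; omega) hne' hbad' (p ++ t) hpt
            hspt (by rw [hept, hte]; exact heb)
        · -- t neither starts... it starts without a sign and ends with one: A merges forward
          have hscf : pvSC (some c) = false := by simpa using hsc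
          cases r with
          | nil =>
            exfalso
            simp [pvBadTail, hts, hscf, hte, heb] at hb
          | cons u r' =>
            have hu : u ≠ "" := hne u (by simp)
            have hA : string2diceGoA (t :: u :: r') [PySem.Str.lower p] =
                string2diceGoA ((t ++ u) :: r') [PySem.Str.lower p] := by
              rw [string2diceGoA.eq_def]
              simp [hfirstL, hscf, hlastL, heb]
            have hB : string2diceClean (p ++ t) (u :: r') =
                string2diceClean p ((t ++ u) :: r') := by
              rw [pvClean_carry (p ++ t) u r', pvClean_carry p (t ++ u) r', pvAppend_assoc]
            have hmerge : pvBadTail ((t ++ u) :: r') = false :=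
              pvBadTail_merge r' ht hu (by rw [hts]; exact hscf)
                (by rw [hte]; exact heb) hb
            have hnem : ∀ v ∈ (t ++ u) :: r', v ≠ "" := by
              intro v hv
              rcases List.mem_cons.mp hv with h | h
              · subst h; exact pvAppend_ne_left _ ht
              · exact hne' v (List.mem_cons_of_mem _ h)
            rw [hA, hBstep, if_pos (by rw [hept, hte]; exact heb), hB]
            exact ih _ (by simp only [List.length_cons] at hlen ⊢; omega) hnem hmerge p hp
              hps hpe
      · -- t does not end with a sign: B emits the merged token, A glues it onto the seed
        have hebf : pvSC (some e) = false := by simpa using heb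
        have hneg : pvEndS (p ++ t) = false := by rw [hept, hte]; exact hebf
        obtain ⟨b, hbL⟩ : ∃ b, p.toList.getLast? = some b :=
          Option.isSome_iff_exists.mp (List.getLast?_isSome.mpr (pvToList_ne hp))
        have hlowlast : PySem.List.pyGet? (PySem.Chars.lower p.toList) (-1) =
            some (PySem.Chars.lowerChar b) := by
          rw [PySem.List.pyGet?_neg_one, PySem.Chars.lower, List.getLast?_map, hbL]; rfl
        have hlowsign : pvSC (some (PySem.Chars.lowerChar b)) = true := by
          rw [pvSC_lowerChar]
          rw [pvEndS, pvLast?_eq, hbL] at hpe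
          exact hpe
        have hA : string2diceGoA (t :: r) [PySem.Str.lower p] =
            string2diceGoA r [PySem.Str.lower p ++ PySem.Str.lower t] := by
          by_cases hsc : pvSC (some c) = true
          · rw [string2diceGoA.eq_def]
            simp [hfirstL, hsc]
          · have hscf : pvSC (some c) = false := by simpa using hsc
            rw [string2diceGoA.eq_def]
            simp [hfirstL, hscf, hlastL, hebf, hlowlast, hlowsign]
        rw [hA, hglue, hBstep, if_neg (by rw [hneg]; simp),
          pvMain n r (by simp only [List.length_cons] at hlen; omega) hne' hbad' _ []
            (pvLower_ne hpt)]
        cases string2diceClean "" r with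
        | none => rfl
        | some cl => rfl

-- ===== VERDICT (by name: the statement is the Claim_ definition above) =====
theorem string2dice_spec : Claim_equal_string2dice := by
  intro L _ hpre
  unfold Spec_string2dice
  obtain ⟨hne0, hneall, _, hbad⟩ := hpre
  cases L with
  | nil => exact absurd rfl hne0
  | cons x rest =>
    have hx : x ≠ "" := hneall x (by simp)
    have hner : ∀ u ∈ rest, u ≠ "" := fun u hu => hneall u (List.mem_cons_of_mem _ hu)
    have hbad' : pvBadTail rest = false := hbad
    obtain ⟨a, as, hxa⟩ := List.exists_cons_of_ne_nil (pvToList_ne hx)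
    have hfirstL : PySem.List.pyGet? (x.toList) 0 = some a := by
      rw [PySem.List.pyGet?_zero, hxa]; rfl
    have hxs : pvStartS x = pvSC (some a) := by
      rw [pvStartS, pvFirst?_eq, hxa]; rfl
    by_cases hcarry : pvStartS x = false ∧ pvEndS x = true
    · -- first token carried by B, seeded by A: the carry-mode simulation
      have hB0 : string2diceClean "" (x :: rest) = string2diceClean x rest := by
        rw [string2diceClean]
        simp [pvEmpty_append, hfirstL, hxs ▸ hcarry.1, hcarry.2]
      rw [string2dice, string2dice_alt, hB0,
        pvCarry rest.length rest le_rfl hner hbad' x hx hcarry.1 hcarry.2]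
      cases string2diceClean x rest with
      | none => rfl
      | some cl => cases cl <;> rfl
    · -- first token emitted at once by both: the main simulation with g = lower x
      have hB0 : string2diceClean "" (x :: rest) =
          (string2diceClean "" rest).map (PySem.Str.lower x :: ·) := by
        rw [string2diceClean]
        rcases Decidable.not_and_iff_not_or_not.mp hcarry with h | h
        · have hsa : pvSC (some a) = true := by
            cases hval : pvStartS x with
            | false => exact absurd hval h
            | true => rw [hxs] at hval; exact hval
          simp [pvEmpty_append, hfirstL, hsa]
        · have hex : pvEndS x = false := by
            cases hval : pvEndS x with
            | false => rfl
            | true => exact absurd hval h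
          simp [pvEmpty_append, hfirstL, hex]
      rw [string2dice, string2dice_alt, hB0,
        pvMain rest.length rest le_rfl hner hbad' (PySem.Str.lower x) [] (pvLower_ne hx)]
      cases string2diceClean "" rest with
      | none => rfl
      | some cl => rfl
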